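-- pv_equiv track=rewrite | github.com/Slooowlly/meu-modo-carreira-v4 | Utils/iracing_conteudo.py | categoria_para_conteudo
-- ===== SOURCE A (Python) =====
-- from typing import Any
--
-- _PRODUCTION_MARCA_PARA_CARRO: dict[str, str] = {
--     "mazda": "mazda_mx5",
--     "toyota": "toyota_gr86",
--     "bmw": "bmw_m2",
-- }
--
-- def categoria_para_conteudo(
--     categoria_id: Any,
--     equipe: dict[str, Any] | None = None,
-- ) -> str:
--     categoria = str(categoria_id or "").strip().lower()
--
--     if categoria in {"mazda_rookie", "mazda_amador"}:
--         return "mazda_mx5"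
--     if categoria in {"toyota_rookie", "toyota_amador"}:
--         return "toyota_gr86"
--     if categoria == "bmw_m2":
--         return "bmw_m2"
--     if categoria == "gt4":
--         return "gt4"
--     if categoria == "gt3":
--         return "gt3"
--     if categoria == "endurance":
--         classe = str((equipe or {}).get("classe_endurance", "") or "").strip().lower()
--         if classe == "gt4":
--             return "gt4"
--         if classe == "gt3":
--             return "gt3"
--         return "lmp2_endurance"
--
--     if categoria == "production_challenger":
--         marca_raw = (
--             str((equipe or {}).get("pro_trilha_marca", "") or "").strip().lower()
--             or str((equipe or {}).get("carro_classe", "") or "").strip().lower()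
--         )
--         for chave, carro_id in _PRODUCTION_MARCA_PARA_CARRO.items():
--             if chave in marca_raw:
--                 return carro_id
--         return "mazda_mx5"
--
--     return ""
-- ===== SOURCE B (Python) =====
-- _BRAND_TABLE = {"mazda": "mazda_mx5", "toyota": "toyota_gr86", "bmw": "bmw_m2"}
--
-- # One declarative rule per category: (keys to read from equipe in order of
-- # preference, match mode, pattern->content table, default content).  Simple
-- # categories read no keys and match nothing, so they yield their default.
-- _RULES = {
--     "mazda_rookie":  ((), "exact", {}, "mazda_mx5"),
--     "mazda_amador":  ((), "exact", {}, "mazda_mx5"),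
--     "toyota_rookie": ((), "exact", {}, "toyota_gr86"),
--     "toyota_amador": ((), "exact", {}, "toyota_gr86"),
--     "bmw_m2":        ((), "exact", {}, "bmw_m2"),
--     "gt4":           ((), "exact", {}, "gt4"),
--     "gt3":           ((), "exact", {}, "gt3"),
--     "endurance":     (("classe_endurance",), "exact",
--                       {"gt4": "gt4", "gt3": "gt3"}, "lmp2_endurance"),
--     "production_challenger": (("pro_trilha_marca", "carro_classe"), "substr",
--                               _BRAND_TABLE, "mazda_mx5"),
-- }
--
--
-- def _norm(valor):
--     return str(valor or "").strip().lower()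
--
--
-- def categoria_para_conteudo(categoria_id, equipe=None):
--     rule = _RULES.get(_norm(categoria_id))
--     if rule is None:
--         return ""
--     keys, mode, table, default = rule
--     dados = equipe or {}
--     selector = next((s for s in (_norm(dados.get(k, "")) for k in keys) if s), "")
--     if mode == "exact":
--         for pattern, content in table.items():
--             if pattern == selector:
--                 return content
--     else:
--         for pattern, content in table.items():
--             if pattern in selector:
--                 return content
--     return default
-- ===== Notes on version B (the rewrite author's own statement) =====
-- stated objective: alternative
-- what changed: Replaces A's chain of special-cased branches with a data-driven design: every category (including endurance and production_challenger) is one declarative rule (equipe keys to read, match mode, pattern table, default) and a single generic resolver picks the first non-empty selector and scans the rule's pattern table, instead of A's per-category inline code.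
import Mathlib
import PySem

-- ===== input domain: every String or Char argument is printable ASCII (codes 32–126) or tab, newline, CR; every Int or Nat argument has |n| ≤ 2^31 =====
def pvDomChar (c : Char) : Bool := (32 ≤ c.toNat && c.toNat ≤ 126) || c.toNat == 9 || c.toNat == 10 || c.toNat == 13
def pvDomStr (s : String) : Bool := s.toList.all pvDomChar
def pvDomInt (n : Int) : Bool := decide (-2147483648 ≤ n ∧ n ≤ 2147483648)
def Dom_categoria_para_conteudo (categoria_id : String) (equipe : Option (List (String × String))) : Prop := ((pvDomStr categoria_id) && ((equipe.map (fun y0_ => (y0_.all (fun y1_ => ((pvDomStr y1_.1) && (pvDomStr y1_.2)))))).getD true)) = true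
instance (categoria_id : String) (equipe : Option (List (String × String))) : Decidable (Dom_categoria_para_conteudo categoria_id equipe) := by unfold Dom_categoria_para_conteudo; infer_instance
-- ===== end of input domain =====

-- B replaces A's chain of special-cased branches with one declarative rule table
-- (keys, mode, pattern table, default) per category plus a single generic resolver: alternative design, same cost.


-- ===== PORT A =====
-- module constant _PRODUCTION_MARCA_PARA_CARRO (insertion order)
def pvProdMarcaParaCarro : List (String × String) :=
  [("mazda", "mazda_mx5"), ("toyota", "toyota_gr86"), ("bmw", "bmw_m2")]

-- 'for chave, carro_id in _PRODUCTION_MARCA_PARA_CARRO.items(): if chave in marca_raw: return carro_id / return "mazda_mx5"'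
def pvProdLoop (items : List (String × String)) (marca_raw : String) : String :=
  match items with
  | [] => "mazda_mx5"
  | (chave, carro_id) :: rest =>
      if PySem.Str.isIn chave marca_raw then carro_id else pvProdLoop rest marca_raw

def categoria_para_conteudo (categoria_id : String) (equipe : Option (List (String × String))) : String :=
  -- str(categoria_id or "") is categoria_id itself for a string argument ('' stays '')
  let categoria := PySem.Str.lower (PySem.Str.strip categoria_id)
  if categoria = "mazda_rookie" ∨ categoria = "mazda_amador" then "mazda_mx5"
  else if categoria = "toyota_rookie" ∨ categoria = "toyota_amador" then "toyota_gr86"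
  else if categoria = "bmw_m2" then "bmw_m2"
  else if categoria = "gt4" then "gt4"
  else if categoria = "gt3" then "gt3"
  else if categoria = "endurance" then
    -- str(x or "") is the identity on the string values admitted here
    let classe := PySem.Str.lower (PySem.Str.strip
      ((PySem.Dict.mk (equipe.getD [])).getD "classe_endurance" ""))
    if classe = "gt4" then "gt4"
    else if classe = "gt3" then "gt3"
    else "lmp2_endurance"
  else if categoria = "production_challenger" then
    let m1 := PySem.Str.lower (PySem.Str.strip
      ((PySem.Dict.mk (equipe.getD [])).getD "pro_trilha_marca" ""))
    let marca_raw := if m1 = "" then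
      PySem.Str.lower (PySem.Str.strip
        ((PySem.Dict.mk (equipe.getD [])).getD "carro_classe" ""))
      else m1
    pvProdLoop pvProdMarcaParaCarro marca_raw
  else ""

-- ===== PORT B =====
-- a rule: (keys to read from equipe, match mode, pattern→content table, default)
def pvRules : PySem.Dict String (List String × String × List (String × String) × String) :=
  PySem.Dict.mk
    [("mazda_rookie",  ([], "exact", [], "mazda_mx5")),
     ("mazda_amador",  ([], "exact", [], "mazda_mx5")),
     ("toyota_rookie", ([], "exact", [], "toyota_gr86")),
     ("toyota_amador", ([], "exact", [], "toyota_gr86")),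
     ("bmw_m2",        ([], "exact", [], "bmw_m2")),
     ("gt4",           ([], "exact", [], "gt4")),
     ("gt3",           ([], "exact", [], "gt3")),
     ("endurance",     (["classe_endurance"], "exact",
                        [("gt4", "gt4"), ("gt3", "gt3")], "lmp2_endurance")),
     ("production_challenger", (["pro_trilha_marca", "carro_classe"], "substr",
                        pvProdMarcaParaCarro, "mazda_mx5"))]

-- _norm(valor) = str(valor or "").strip().lower(); the identity wrappers vanish on strings
def pvNorm (valor : String) : String := PySem.Str.lower (PySem.Str.strip valor)

-- 'for pattern, content in table.items(): if pattern == selector: return content' (none = fell through)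
def pvScanExact (table : List (String × String)) (selector : String) : Option String :=
  match table with
  | [] => none
  | (pattern, content) :: rest =>
      if pattern = selector then some content else pvScanExact rest selector

-- 'for pattern, content in table.items(): if pattern in selector: return content' (none = fell through)
def pvScanSub (table : List (String × String)) (selector : String) : Option String :=
  match table with
  | [] => none
  | (pattern, content) :: rest =>
      if PySem.Str.isIn pattern selector then some content else pvScanSub rest selector

def categoria_para_conteudo_alt (categoria_id : String) (equipe : Option (List (String × String))) : String :=
  match pvRules.get? (pvNorm categoria_id) with
  | none => ""
  | some (keys, mode, table, dflt) =>
      let dados := PySem.Dict.mk (equipe.getD [])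
      -- next((s for s in (_norm(dados.get(k, "")) for k in keys) if s), "")
      let selector := ((keys.map (fun k => pvNorm (dados.getD k ""))).find? (fun s => s ≠ "")).getD ""
      if mode = "exact" then (pvScanExact table selector).getD dflt
      else (pvScanSub table selector).getD dflt

-- ===== PRECONDITION & SPEC =====
def Spec_categoria_para_conteudo (categoria_id : String) (equipe : Option (List (String × String))) (out : String) : Prop := out = categoria_para_conteudo_alt categoria_id equipe
instance (categoria_id : String) (equipe : Option (List (String × String))) (out : String) : Decidable (Spec_categoria_para_conteudo categoria_id equipe out) := by unfold Spec_categoria_para_conteudo; infer_instance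

-- ===== CLAIM (what is proved, stated in full; the proofs are below) =====
def Claim_equal_categoria_para_conteudo : Prop := ∀ (categoria_id : String) (equipe : Option (List (String × String))), Dom_categoria_para_conteudo categoria_id equipe → Spec_categoria_para_conteudo categoria_id equipe (categoria_para_conteudo categoria_id equipe)

-- ===== LEMMAS AND PROOFS =====
lemma pvProdLoop_eq_scan (marca : String) :
    pvProdLoop pvProdMarcaParaCarro marca
      = (pvScanSub pvProdMarcaParaCarro marca).getD "mazda_mx5" := by
  simp only [pvProdMarcaParaCarro, pvProdLoop, pvScanSub]
  by_cases h1 : PySem.Chars.isIn ['m','a','z','d','a'] marca.toList = true <;>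
  by_cases h2 : PySem.Chars.isIn ['t','o','y','o','t','a'] marca.toList = true <;>
  by_cases h3 : PySem.Chars.isIn ['b','m','w'] marca.toList = true <;>
    simp [PySem.Str.isIn, h1, h2, h3]

lemma pvRules_mazda_rookie : pvRules.get? "mazda_rookie" = some ([], "exact", [], "mazda_mx5") := by decide
lemma pvRules_mazda_amador : pvRules.get? "mazda_amador" = some ([], "exact", [], "mazda_mx5") := by decide
lemma pvRules_toyota_rookie : pvRules.get? "toyota_rookie" = some ([], "exact", [], "toyota_gr86") := by decide
lemma pvRules_toyota_amador : pvRules.get? "toyota_amador" = some ([], "exact", [], "toyota_gr86") := by decide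
lemma pvRules_bmw : pvRules.get? "bmw_m2" = some ([], "exact", [], "bmw_m2") := by decide
lemma pvRules_gt4 : pvRules.get? "gt4" = some ([], "exact", [], "gt4") := by decide
lemma pvRules_gt3 : pvRules.get? "gt3" = some ([], "exact", [], "gt3") := by decide
lemma pvRules_endurance : pvRules.get? "endurance"
    = some (["classe_endurance"], "exact", [("gt4","gt4"),("gt3","gt3")], "lmp2_endurance") := by decide
lemma pvRules_production : pvRules.get? "production_challenger"
    = some (["pro_trilha_marca", "carro_classe"], "substr", pvProdMarcaParaCarro, "mazda_mx5") := by decide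
lemma pvRules_none (c : String) (n1 : c ≠ "mazda_rookie") (n2 : c ≠ "mazda_amador")
    (n3 : c ≠ "toyota_rookie") (n4 : c ≠ "toyota_amador") (n5 : c ≠ "bmw_m2")
    (n6 : c ≠ "gt4") (n7 : c ≠ "gt3") (n8 : c ≠ "endurance")
    (n9 : c ≠ "production_challenger") : pvRules.get? c = none := by
  simp [pvRules, PySem.Dict.get?, Ne.symm n1, Ne.symm n2, Ne.symm n3, Ne.symm n4,
    Ne.symm n5, Ne.symm n6, Ne.symm n7, Ne.symm n8, Ne.symm n9]

-- ===== VERDICT (by name: the statement is the Claim_ definition above) =====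
set_option maxHeartbeats 1600000 in
theorem categoria_para_conteudo_spec : Claim_equal_categoria_para_conteudo := by
  intro categoria_id equipe _
  unfold Spec_categoria_para_conteudo categoria_para_conteudo categoria_para_conteudo_alt pvNorm
  generalize PySem.Str.lower (PySem.Str.strip categoria_id) = categoria
  by_cases h1 : categoria = "mazda_rookie"
  · subst h1; rw [pvRules_mazda_rookie]; simp [pvScanExact]
  by_cases h2 : categoria = "mazda_amador"
  · subst h2; rw [pvRules_mazda_amador]; simp [pvScanExact]
  by_cases h3 : categoria = "toyota_rookie"
  · subst h3; rw [pvRules_toyota_rookie]; simp [pvScanExact]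
  by_cases h4 : categoria = "toyota_amador"
  · subst h4; rw [pvRules_toyota_amador]; simp [pvScanExact]
  by_cases h5 : categoria = "bmw_m2"
  · subst h5; rw [pvRules_bmw]; simp [pvScanExact]
  by_cases h6 : categoria = "gt4"
  · subst h6; rw [pvRules_gt4]; simp [pvScanExact]
  by_cases h7 : categoria = "gt3"
  · subst h7; rw [pvRules_gt3]; simp [pvScanExact]
  by_cases h8 : categoria = "endurance"
  · subst h8
    rw [pvRules_endurance]
    by_cases g0 : PySem.Str.lower (PySem.Str.strip
        ((PySem.Dict.mk (equipe.getD [])).getD "classe_endurance" "")) = ""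
    · simp [pvScanExact, g0]
    by_cases g1 : PySem.Str.lower (PySem.Str.strip
        ((PySem.Dict.mk (equipe.getD [])).getD "classe_endurance" "")) = "gt4"
    · simp [pvScanExact, g1]
    by_cases g2 : PySem.Str.lower (PySem.Str.strip
        ((PySem.Dict.mk (equipe.getD [])).getD "classe_endurance" "")) = "gt3"
    · simp [pvScanExact, g2]
    · simp [pvScanExact, g0, g1, g2, Ne.symm g1, Ne.symm g2]
  by_cases h9 : categoria = "production_challenger"
  · subst h9
    rw [pvRules_production, pvProdLoop_eq_scan]
    by_cases e1 : PySem.Str.lower (PySem.Str.strip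
        ((PySem.Dict.mk (equipe.getD [])).getD "pro_trilha_marca" "")) = ""
    · by_cases e2 : PySem.Str.lower (PySem.Str.strip
          ((PySem.Dict.mk (equipe.getD [])).getD "carro_classe" "")) = ""
      · simp [e1, e2]
      · simp [e1, e2]
    · simp [e1]
  rw [pvRules_none categoria h1 h2 h3 h4 h5 h6 h7 h8 h9]
  simp [h1, h2, h3, h4, h5, h6, h7, h8, h9]
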